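-- pv_equiv track=rewrite | github.com/pollinnshh/EGE | lessons/24-01-25 (15)/task-15-14353.py | f
-- ===== SOURCE A (Python) =====
-- def f(a):
--     for x in range(1,1000):
--         u1 = (a + 7 > x) and (a + x > 7) and (7 + x > a)
--         u2 = (36 + 21 > x) and (21 + x > 36) and (36 + x > 21)
--         f = u1 <= ((max(x + 5, 14) <= 27) == (not u2))
--         if not f:
--             return False
--     return True
-- ===== SOURCE B (Python) =====
-- def f(a):
--     # The loop body is false exactly when the open interval (|a-7|, a+7)
--     # contains an integer x in {16..22} or {57..999}.
--     lo = max(abs(a - 7) + 1, 1)   # smallest candidate x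
--     hi = min(a + 6, 999)          # largest candidate x
--     return not ((lo <= 22 and hi >= 16) or (lo <= 999 and hi >= 57))
-- ===== Notes on version B (the rewrite author's own statement) =====
-- stated objective: faster
-- what changed: A scans all x in 1..999 checking an implication per x; B derives that the implication fails exactly when the open interval (|a-7|, a+7) of triangle-compatible x meets {16..22} or {57..999}, and tests that by constant-time interval endpoint arithmetic.
import Mathlib
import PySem

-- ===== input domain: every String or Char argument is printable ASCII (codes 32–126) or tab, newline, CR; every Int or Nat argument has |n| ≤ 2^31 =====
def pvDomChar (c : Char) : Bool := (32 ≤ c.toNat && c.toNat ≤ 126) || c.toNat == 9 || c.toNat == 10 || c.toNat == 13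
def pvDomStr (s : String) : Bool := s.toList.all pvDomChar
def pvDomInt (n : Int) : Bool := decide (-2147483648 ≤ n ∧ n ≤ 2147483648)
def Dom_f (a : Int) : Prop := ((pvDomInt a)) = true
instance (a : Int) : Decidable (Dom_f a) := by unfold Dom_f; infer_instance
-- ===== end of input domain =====

-- B replaces A's scan over x = 1..999 by constant-time interval arithmetic on the triangle inequality.

-- ===== PORT A =====
-- per-iteration body of A's loop: the value Python binds to the inner `f`
def fChk (a x : Int) : Bool :=
  let u1 := decide (a + 7 > x) && decide (a + x > 7) && decide (7 + x > a)
  let u2 := decide (36 + 21 > x) && decide (21 + x > 36) && decide (36 + x > 21)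
  (!u1) || ((decide (max (x + 5) 14 ≤ 27)) == (!u2))

-- the for-loop with early `return False`
def fLoop (a : Int) : List Int → Bool
  | [] => true
  | x :: rest => if !(fChk a x) then false else fLoop a rest

def f (a : Int) : Bool := fLoop a (PySem.List.pyRange 1 1000 1)

-- ===== PORT B =====
def f_alt (a : Int) : Bool :=
  let lo := max (|a - 7| + 1) 1
  let hi := min (a + 6) 999
  !((decide (lo ≤ 22) && decide (hi ≥ 16)) || (decide (lo ≤ 999) && decide (hi ≥ 57)))

-- ===== PRECONDITION & SPEC =====
def Spec_f (a : Int) (out : Bool) : Prop := out = f_alt a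
instance (a : Int) (out : Bool) : Decidable (Spec_f a out) := by unfold Spec_f; infer_instance

-- ===== CLAIM (what is proved, stated in full; the proofs are below) =====
def Claim_equal_f : Prop := ∀ (a : Int), Dom_f a → Spec_f a (f a)

-- ===== LEMMAS AND PROOFS =====

-- A's loop body, characterised arithmetically
theorem fChk_eq_true_iff (a x : Int) :
    fChk a x = true ↔ ¬ ((a + 7 > x ∧ a + x > 7 ∧ 7 + x > a) ∧ ((16 ≤ x ∧ x ≤ 22) ∨ 57 ≤ x)) := by
  simp only [fChk, ← Bool.decide_and, ← decide_not, beq_iff_eq, decide_eq_decide,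
    Bool.or_eq_true, decide_eq_true_eq]
  omega

-- the early-return loop returns true iff every element passes the check
theorem fLoop_eq_true_iff (a : Int) (xs : List Int) :
    fLoop a xs = true ↔ ∀ x ∈ xs, fChk a x = true := by
  induction xs with
  | nil => simp [fLoop]
  | cons x rest ih =>
    cases h : fChk a x <;> simp [fLoop, h, ih]

-- B, characterised arithmetically
theorem f_alt_eq_true_iff (a : Int) :
    f_alt a = true ↔ ¬ ((max (|a - 7| + 1) 1 ≤ 22 ∧ min (a + 6) 999 ≥ 16) ∨
                        (max (|a - 7| + 1) 1 ≤ 999 ∧ min (a + 6) 999 ≥ 57)) := by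
  simp only [f_alt, ← Bool.decide_and, ← Bool.decide_or, ← decide_not, decide_eq_true_eq]

-- ===== VERDICT (by name: the statement is the Claim_ definition above) =====
theorem f_spec : Claim_equal_f := by
  intro a _
  unfold Spec_f
  rcases Bool.eq_false_or_eq_true (f_alt a) with hb | hb
  case inl =>
    -- f_alt a = true: every x in 1..999 passes the check
    rw [hb]
    have h := (f_alt_eq_true_iff a).mp hb
    rw [f, fLoop_eq_true_iff]
    intro x hx
    rw [PySem.List.mem_pyRange_one] at hx
    rw [fChk_eq_true_iff]
    have hnn := abs_nonneg (a - 7)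
    rcases abs_choice (a - 7) with hh | hh <;> omega
  case inr =>
    -- f_alt a = false: the interval meets a bad block, exhibit a failing x
    rw [hb, ← Bool.not_eq_true]
    have h : ¬ f_alt a = true := by simp [hb]
    rw [f_alt_eq_true_iff, not_not] at h
    rw [f, fLoop_eq_true_iff]
    intro hall
    have hnn := abs_nonneg (a - 7)
    rcases h with ⟨h1, h2⟩ | ⟨h1, h2⟩
    · have hmem : max (max (|a - 7| + 1) 1) 16 ∈ PySem.List.pyRange 1 1000 1 := by
        rw [PySem.List.mem_pyRange_one]; omega
      have := (fChk_eq_true_iff a _).mp (hall _ hmem)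
      rcases abs_choice (a - 7) with hh | hh <;>
        exact this ⟨by constructor <;> omega, Or.inl (by omega)⟩
    · have hmem : max (max (|a - 7| + 1) 1) 57 ∈ PySem.List.pyRange 1 1000 1 := by
        rw [PySem.List.mem_pyRange_one]; omega
      have := (fChk_eq_true_iff a _).mp (hall _ hmem)
      rcases abs_choice (a - 7) with hh | hh <;>
        exact this ⟨by constructor <;> omega, Or.inr (by omega)⟩
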